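-- pv_equiv track=rewrite | github.com/roleyguacamole/AdventOfCode | Y2015 D08.py | codeMinusString
-- ===== SOURCE A (Python) =====
-- def codeMinusString(string):
--     if string[-1] == "\n":
--         codeLength = len(string) - 1
--     else:
--         codeLength = len(string)
--     strLen = 0
--     encodeLength = 0
--     codeIndex = 1
--     encodeIndex = 0
--     while encodeIndex < codeLength:
--         if codeIndex < codeLength - 1:
--             if string[codeIndex] == '\\':
--                 if string[codeIndex + 1] == 'x':
--                     codeIndex += 4
--                 else:
--                     codeIndex += 2
--             else:
--                 codeIndex += 1
--             strLen += 1
--         if string[encodeIndex] == "\"":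
--             if encodeIndex == 0 or encodeIndex == codeLength - 1:
--                 encodeLength += 3
--             else:
--                 encodeLength += 2
--         elif string[encodeIndex] == "\\":
--             encodeLength += 2
--         else:
--             encodeLength += 1
--         encodeIndex += 1
--     return codeLength - strLen , encodeLength - codeLength
-- ===== SOURCE B (Python) =====
-- def codeMinusString(string):
--     if string[-1] == "\n":
--         codeLength = len(string) - 1
--     else:
--         codeLength = len(string)
--     body = string[:codeLength]
--     # decode: walk the escapes directly
--     strLen = 0
--     i = 1
--     while i < codeLength - 1:
--         strLen += 1
--         if string[i] == '\\':
--             i += 4 if string[i + 1] == 'x' else 2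
--         else:
--             i += 1
--     # encode: each quote or backslash adds one extra char; boundary quotes add two
--     encodeDiff = body.count('"') + body.count('\\')
--     if codeLength > 0 and body[0] == '"':
--         encodeDiff += 1
--     if codeLength > 1 and body[-1] == '"':
--         encodeDiff += 1
--     return codeLength - strLen, encodeDiff
-- ===== Notes on version B (the rewrite author's own statement) =====
-- stated objective: simpler
-- what changed: A's single while-loop that interleaves the decode walk and the per-character encode cost accumulation is split into an independent decode walk plus a count-based encode formula (str.count of quotes and backslashes with boundary-quote extras) instead of a per-character cost branch.
import Mathlib
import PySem

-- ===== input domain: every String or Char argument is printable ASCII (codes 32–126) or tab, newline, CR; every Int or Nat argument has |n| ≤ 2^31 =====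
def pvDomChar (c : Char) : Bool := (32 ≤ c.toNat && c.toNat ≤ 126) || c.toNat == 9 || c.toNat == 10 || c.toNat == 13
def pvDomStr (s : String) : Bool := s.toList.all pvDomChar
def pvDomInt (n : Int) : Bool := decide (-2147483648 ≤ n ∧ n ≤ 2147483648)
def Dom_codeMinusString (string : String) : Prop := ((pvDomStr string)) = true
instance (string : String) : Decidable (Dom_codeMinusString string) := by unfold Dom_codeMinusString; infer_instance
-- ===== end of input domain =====

-- B replaces A's single interleaved decode/encode loop by a direct decode walk plus a
-- count-based encode formula (objective: simpler; same return value wherever A returns).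

-- ===== PORT A =====
-- A's encodeLength update (the second if-chain of the loop body), as a helper.
def pvEStep (s : List Char) (L eIdx encLen : Nat) : Nat :=
  if s.getD eIdx ' ' = '"' then
    if eIdx = 0 ∨ eIdx + 1 = L then encLen + 3 else encLen + 2
  else if s.getD eIdx ' ' = '\\' then encLen + 2
  else encLen + 1

-- A's while loop: state (encodeIndex, codeIndex, strLen, encodeLength); fuel n = codeLength -
-- encodeIndex counts the remaining iterations.  `cIdx + 1 < L` is Python's
-- `codeIndex < codeLength - 1` on naturals; all reached indexed accesses are in range, so
-- `getD` is exact there.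
def pvALoop (s : List Char) (L : Nat) : Nat → Nat → Nat → Nat → Nat → Nat × Nat
  | 0, _, _, strLen, encLen => (strLen, encLen)
  | n+1, eIdx, cIdx, strLen, encLen =>
    if cIdx + 1 < L then
      if s.getD cIdx ' ' = '\\' then
        if s.getD (cIdx+1) ' ' = 'x' then
          pvALoop s L n (eIdx+1) (cIdx+4) (strLen+1) (pvEStep s L eIdx encLen)
        else pvALoop s L n (eIdx+1) (cIdx+2) (strLen+1) (pvEStep s L eIdx encLen)
      else pvALoop s L n (eIdx+1) (cIdx+1) (strLen+1) (pvEStep s L eIdx encLen)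
    else pvALoop s L n (eIdx+1) cIdx strLen (pvEStep s L eIdx encLen)

def codeMinusString (string : String) : Int × Int :=
  let s := string.toList
  match s.getLast? with
  | none => (0, 0)           -- unreachable: Python raises IndexError on "", excluded by Pre_
  | some last =>
    let L := if last = '\n' then s.length - 1 else s.length
    let r := pvALoop s L L 0 1 0 0
    ((L : Int) - (r.1 : Int), (r.2 : Int) - (L : Int))

-- ===== PORT B =====
-- Source B's decode while-loop; fuel L suffices since i starts at 1 and grows by ≥ 1 each step.
def pvBDecode (s : List Char) (L : Nat) : Nat → Nat → Nat
  | 0, _ => 0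
  | fuel+1, i =>
    if i + 1 < L then                                    -- i < codeLength - 1
      if s.getD i ' ' = '\\' then
        if s.getD (i+1) ' ' = 'x' then 1 + pvBDecode s L fuel (i + 4)
        else 1 + pvBDecode s L fuel (i + 2)
      else 1 + pvBDecode s L fuel (i + 1)
    else 0

def codeMinusString_alt (string : String) : Int × Int :=
  let s := string.toList
  match s.getLast? with
  | none => (0, 0)           -- unreachable: Source B also raises IndexError on ""
  | some last =>
    let L := if last = '\n' then s.length - 1 else s.length
    let strLen := pvBDecode s L L 1
    let body := s.take L
    let d0 := body.count '"' + body.count '\\'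
    let d1 := if 0 < L ∧ body.headD ' ' = '"' then d0 + 1 else d0
    let d2 := if 1 < L ∧ (body.getLast?.getD ' ') = '"' then d1 + 1 else d1
    ((L : Int) - (strLen : Int), (d2 : Int))

-- ===== PRECONDITION & SPEC =====
-- Pre_ excludes only the empty string, on which A (string[-1]) raises IndexError.
def Pre_codeMinusString (string : String) : Prop := string.toList ≠ []
instance (string : String) : Decidable (Pre_codeMinusString string) := by unfold Pre_codeMinusString; infer_instance
def pvWitness_codeMinusString : String := "\"a\\x27\""

def Spec_codeMinusString (string : String) (out : Int × Int) : Prop := out = codeMinusString_alt string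
instance (string : String) (out : Int × Int) : Decidable (Spec_codeMinusString string out) := by unfold Spec_codeMinusString; infer_instance

-- ===== CLAIM (what is proved, stated in full; the proofs are below) =====
def Claim_equal_codeMinusString : Prop := ∀ (string : String), Dom_codeMinusString string → Pre_codeMinusString string → Spec_codeMinusString string (codeMinusString string)

-- ===== LEMMAS AND PROOFS =====

-- proof helpers: the per-index cost of A's encode branch, and its running sum
def pvECost (s : List Char) (L e : Nat) : Nat :=
  if s.getD e ' ' = '"' then (if e = 0 ∨ e + 1 = L then 3 else 2)
  else if s.getD e ' ' = '\\' then 2 else 1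

def pvELen (s : List Char) (L : Nat) : Nat → Nat → Nat
  | 0, _ => 0
  | n+1, e => pvECost s L e + pvELen s L n (e+1)

theorem pvEStep_eq (s : List Char) (L e b : Nat) : pvEStep s L e b = b + pvECost s L e := by
  unfold pvEStep pvECost; split_ifs <;> omega

theorem pvBDecode_stall (s : List Char) (L : Nat) (n i : Nat) (h : ¬ i + 1 < L) :
    pvBDecode s L n i = 0 := by
  cases n <;> simp [pvBDecode, h]

-- decoupling: A's interleaved loop is the bounded decode walk plus the encode cost sum
theorem pvALoop_split (s : List Char) (L : Nat) :
    ∀ n e c a b, pvALoop s L n e c a b = (a + pvBDecode s L n c, b + pvELen s L n e) := by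
  intro n
  induction n with
  | zero => intro e c a b; simp [pvALoop, pvBDecode, pvELen]
  | succ n ih =>
    intro e c a b
    rw [pvALoop, pvBDecode, pvELen]
    by_cases hc : c + 1 < L
    · rw [if_pos hc, if_pos hc]
      by_cases hbs : s.getD c ' ' = '\\'
      · rw [if_pos hbs, if_pos hbs]
        by_cases hx : s.getD (c+1) ' ' = 'x'
        · rw [if_pos hx, if_pos hx, ih, pvEStep_eq]
          simp only [Prod.mk.injEq, true_and, and_true]; omega
        · rw [if_neg hx, if_neg hx, ih, pvEStep_eq]
          simp only [Prod.mk.injEq, true_and, and_true]; omega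
      · rw [if_neg hbs, if_neg hbs, ih, pvEStep_eq]
        simp only [Prod.mk.injEq, true_and, and_true]; omega
    · rw [if_neg hc, if_neg hc, ih, pvEStep_eq, pvBDecode_stall s L n c hc]
      simp only [Prod.mk.injEq, true_and, and_true]; omega

-- encode sum = counts over the body plus the boundary-quote extras
theorem pvELen_count (s : List Char) (L : Nat) (hL : L ≤ s.length) :
    ∀ n e, e + n = L →
      pvELen s L n e = n + ((s.take L).drop e).count '"' + ((s.take L).drop e).count '\\'
        + (if e = 0 ∧ 0 < L ∧ s.getD 0 ' ' = '"' then 1 else 0)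
        + (if n ≠ 0 ∧ 1 < L ∧ s.getD (L-1) ' ' = '"' then 1 else 0) := by
  intro n
  induction n with
  | zero =>
    intro e he
    have e1 : (if e = 0 ∧ 0 < L ∧ s.getD 0 ' ' = '"' then 1 else 0) = 0 := by
      rw [if_neg]; rintro ⟨h1, h2, -⟩; omega
    have e2 : (if (0:Nat) ≠ 0 ∧ 1 < L ∧ s.getD (L-1) ' ' = '"' then 1 else 0) = 0 := by
      rw [if_neg]; rintro ⟨h, -⟩; exact h rfl
    rw [e1, e2, List.drop_eq_nil_of_le (by simp; omega)]
    simp [pvELen]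
  | succ n ih =>
    intro e he
    have heL : e < L := by omega
    have heS : e < s.length := by omega
    have hdrop : (s.take L).drop e = s[e] :: (s.take L).drop (e+1) := by
      rw [List.drop_eq_getElem_cons (by simp; omega)]
      congr 1
      simp
    have hgetD : s.getD e ' ' = s[e] := by
      rw [List.getD_eq_getElem?_getD, List.getElem?_eq_getElem heS, Option.getD_some]
    rw [pvELen, ih (e+1) (by omega), hdrop]
    clear ih hdrop
    unfold pvECost
    rw [hgetD]
    simp only [List.count_cons, beq_iff_eq]
    by_cases hn : n = 0
    · have hrw : s.getD (L-1) ' ' = s[e] := by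
        rw [show L - 1 = e by omega]; exact hgetD
      rw [hrw]
      by_cases he0 : e = 0
      · subst he0
        rw [hgetD]
        split_ifs <;> first | omega | (simp_all; try omega)
      · split_ifs <;> first | omega | (simp_all; try omega)
    · by_cases he0 : e = 0
      · subst he0
        rw [hgetD]
        split_ifs <;> first | omega | (simp_all; try omega)
      · split_ifs <;> first | omega | (simp_all; try omega)

theorem pvHead_take (s : List Char) (L : Nat) (h0 : 0 < L) (hL : L ≤ s.length) :
    (s.take L).headD ' ' = s.getD 0 ' ' := by
  cases s with
  | nil => simp at hL; omega
  | cons a t => cases L with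
    | zero => omega
    | succ m => simp [List.take_succ_cons]

theorem pvLast_take (s : List Char) (L : Nat) (h0 : 0 < L) (hL : L ≤ s.length) :
    (s.take L).getLast?.getD ' ' = s.getD (L-1) ' ' := by
  rw [List.getLast?_eq_getElem?, List.getD_eq_getElem?_getD]
  have hlen : (s.take L).length = L := by simp; omega
  rw [hlen, List.getElem?_take_of_lt (by omega)]

-- the second components agree: A's encode sum minus L equals B's count-based difference
theorem pvAssemble (s : List Char) (L : Nat) (hL : L ≤ s.length) :
    ((pvELen s L L 0 : Int) - (L : Int)) =
      ((if 1 < L ∧ (s.take L).getLast?.getD ' ' = '"' then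
          (if 0 < L ∧ (s.take L).headD ' ' = '"' then
            (s.take L).count '"' + (s.take L).count '\\' + 1
          else (s.take L).count '"' + (s.take L).count '\\') + 1
        else
          (if 0 < L ∧ (s.take L).headD ' ' = '"' then
            (s.take L).count '"' + (s.take L).count '\\' + 1
          else (s.take L).count '"' + (s.take L).count '\\') : Nat) : Int) := by
  have hcount := pvELen_count s L hL L 0 (by omega)
  simp only [List.drop_zero] at hcount
  rw [hcount]
  clear hcount
  by_cases h0 : 0 < L
  · rw [pvHead_take s L h0 hL, pvLast_take s L h0 hL]
    split_ifs <;> first | omega | (simp_all; try omega)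
  · split_ifs <;> first | omega | (simp_all; try omega)

-- ===== VERDICT (by name: the statement is the Claim_ definition above) =====
theorem codeMinusString_spec : Claim_equal_codeMinusString := by
  intro string _ hpre
  unfold Spec_codeMinusString codeMinusString codeMinusString_alt
  cases hlast : string.toList.getLast? with
  | none => exact absurd (List.getLast?_eq_none_iff.mp hlast) hpre
  | some last =>
    simp only [hlast]
    rw [pvALoop_split]
    simp only [Nat.zero_add, Prod.mk.injEq]
    refine ⟨trivial, ?_⟩
    exact pvAssemble string.toList _ (by split_ifs <;> omega)
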